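-- pv_equiv track=rewrite | github.com/Thom315317/RARE_AREA | cogs_compositional.py | build_verb_form_maps
-- ===== SOURCE A (Python) =====
-- def build_verb_form_maps(train_pairs):
--     """Extract verb_lemma → past_tense (from actives) and verb_lemma → past_participle
--     (from passives) by scanning train. Returns (pt_map, pp_map)."""
--     pt_map, pp_map = {}, {}
--     for inp, lf, _ in train_pairs:
--         toks = inp.split()
--         lf_toks = lf.split()
--         # Find verb lemma + event position from LF (head of .agent)
--         verb_lemma, verb_pos = None, None
--         for j in range(len(lf_toks) - 6):
--             if lf_toks[j + 1] == "." and lf_toks[j + 2] == "agent" \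
--                     and lf_toks[j + 3] == "(" and lf_toks[j + 4] == "x" \
--                     and lf_toks[j + 5] == "_" and lf_toks[j + 6].isdigit():
--                 verb_lemma = lf_toks[j]
--                 verb_pos = int(lf_toks[j + 6])
--                 break
--         if verb_lemma is None or verb_pos is None or verb_pos >= len(toks):
--             continue
--         verb_word = toks[verb_pos]
--         if "was" in toks and "by" in toks:
--             pp_map.setdefault(verb_lemma, verb_word)
--         else:
--             pt_map.setdefault(verb_lemma, verb_word)
--     return pt_map, pp_map
-- ===== SOURCE B (Python) =====
-- def _entry(trip):
--     """Return (lemma, verb_word, is_passive) for one training pair, or None."""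
--     inp, lf, _ = trip
--     toks = inp.split()
--     lf_toks = lf.split()
--     while len(lf_toks) >= 7:
--         v, d, a, p, x, u, n = lf_toks[:7]
--         if d == "." and a == "agent" and p == "(" and x == "x" and u == "_" and n.isdigit():
--             pos = int(n)
--             if pos >= len(toks):
--                 return None
--             return v, toks[pos], ("was" in toks and "by" in toks)
--         lf_toks = lf_toks[1:]
--     return None
--
--
-- def build_verb_form_maps(train_pairs):
--     entries = [e for trip in train_pairs if (e := _entry(trip)) is not None]
--     pt_map, pp_map = {}, {}
--     for lemma, word, passive in entries:
--         target = pp_map if passive else pt_map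
--         if lemma not in target:
--             target[lemma] = word
--     return pt_map, pp_map
-- ===== Notes on version B (the rewrite author's own statement) =====
-- stated objective: idiomatic
-- what changed: B replaces A's manual index-window loop with a head-recursive 7-token window matcher extracted as a helper, and splits the single accumulating pass into a comprehension producing (lemma, word, passive) entries followed by a separate map-building pass with explicit membership tests instead of setdefault.
import Mathlib
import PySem

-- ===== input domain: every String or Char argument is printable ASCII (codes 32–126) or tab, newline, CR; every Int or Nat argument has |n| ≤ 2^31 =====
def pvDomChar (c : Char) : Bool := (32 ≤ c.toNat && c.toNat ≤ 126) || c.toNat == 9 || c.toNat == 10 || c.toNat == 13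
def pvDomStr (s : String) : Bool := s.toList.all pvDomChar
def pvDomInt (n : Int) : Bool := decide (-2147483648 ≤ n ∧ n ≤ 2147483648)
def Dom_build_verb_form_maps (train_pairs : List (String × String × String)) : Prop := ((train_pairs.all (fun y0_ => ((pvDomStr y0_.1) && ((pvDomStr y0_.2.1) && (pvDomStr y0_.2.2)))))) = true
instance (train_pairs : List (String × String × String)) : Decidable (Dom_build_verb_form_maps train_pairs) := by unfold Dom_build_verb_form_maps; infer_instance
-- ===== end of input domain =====

-- B restructures A: a recursive 7-token window matcher replaces the index loop, and a
-- filtered entries pass followed by a separate map-building pass replaces the single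
-- accumulating loop (objective: idiomatic; same asymptotic cost).


-- ===== PORT A =====
-- inner 'for j in range(len(lf_toks) - 6): … break' of A, as structural recursion over the range list
def pvFindLoopA (lf_toks : List String) : List Int → Option String × Option Int
  | [] => (none, none)
  | j :: rest =>
    if (PySem.List.pyGet? lf_toks (j + 1) == some ".") &&
       (PySem.List.pyGet? lf_toks (j + 2) == some "agent") &&
       (PySem.List.pyGet? lf_toks (j + 3) == some "(") &&
       (PySem.List.pyGet? lf_toks (j + 4) == some "x") &&
       (PySem.List.pyGet? lf_toks (j + 5) == some "_") &&
       ((PySem.List.pyGet? lf_toks (j + 6)).map PySem.Str.strIsdigit == some true) then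
      -- int(lf_toks[j+6]): guarded by isdigit, so ofStr? succeeds; getD 0 is unreachable
      (PySem.List.pyGet? lf_toks j,
       some (((PySem.List.pyGet? lf_toks (j + 6)).bind PySem.Int.ofStr?).getD 0))
    else pvFindLoopA lf_toks rest

def pvStepA (st : PySem.Dict String String × PySem.Dict String String)
    (p : String × String × String) : PySem.Dict String String × PySem.Dict String String :=
  let toks := PySem.Str.split₀ p.1
  let lf_toks := PySem.Str.split₀ p.2.1
  match pvFindLoopA lf_toks (PySem.List.pyRange 0 ((lf_toks.length : Int) - 6) 1) with
  | (some verb_lemma, some verb_pos) =>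
    if verb_pos ≥ (toks.length : Int) then st
    else
      match PySem.List.pyGet? toks verb_pos with
      | some verb_word =>
        if toks.contains "was" && toks.contains "by" then
          (st.1, st.2.setdefault verb_lemma verb_word)
        else
          (st.1.setdefault verb_lemma verb_word, st.2)
      | none => st  -- unreachable: 0 ≤ verb_pos < len(toks)
  | _ => st

def build_verb_form_maps (train_pairs : List (String × String × String)) :
    (List (String × String)) × (List (String × String)) :=
  let res := train_pairs.foldl pvStepA (PySem.Dict.empty, PySem.Dict.empty)
  (res.1.items, res.2.items)

-- ===== PORT B =====
-- Source B's _find_agent-style window scan inside _entry: recursion on the token list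
def pvFindAgentB : List String → Option (String × Int)
  | v :: d :: a :: p :: x :: u :: n :: rest =>
    if (d == ".") && (a == "agent") && (p == "(") && (x == "x") && (u == "_") &&
       PySem.Str.strIsdigit n then
      -- int(n): guarded by isdigit, so ofStr? succeeds; getD 0 is unreachable
      some (v, (PySem.Int.ofStr? n).getD 0)
    else pvFindAgentB (d :: a :: p :: x :: u :: n :: rest)
  | _ => none

def pvEntryB (trip : String × String × String) : Option (String × String × Bool) :=
  let toks := PySem.Str.split₀ trip.1
  match pvFindAgentB (PySem.Str.split₀ trip.2.1) with
  | none => none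
  | some (lem, pos) =>
    if pos ≥ (toks.length : Int) then none
    else
      match PySem.List.pyGet? toks pos with
      | none => none  -- unreachable: 0 ≤ pos < len(toks)
      | some w => some (lem, w, toks.contains "was" && toks.contains "by")

def pvStepB (st : PySem.Dict String String × PySem.Dict String String)
    (e : String × String × Bool) : PySem.Dict String String × PySem.Dict String String :=
  match e with
  | (lem, word, passive) =>
    if passive then
      (st.1, if st.2.contains lem then st.2 else st.2.insert lem word)
    else
      ((if st.1.contains lem then st.1 else st.1.insert lem word), st.2)

def build_verb_form_maps_alt (train_pairs : List (String × String × String)) :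
    (List (String × String)) × (List (String × String)) :=
  let entries := train_pairs.filterMap pvEntryB
  let res := entries.foldl pvStepB (PySem.Dict.empty, PySem.Dict.empty)
  (res.1.items, res.2.items)

-- ===== PRECONDITION & SPEC =====
def Spec_build_verb_form_maps (train_pairs : List (String × String × String)) (out : (List (String × String)) × (List (String × String))) : Prop := out = build_verb_form_maps_alt train_pairs
instance (train_pairs : List (String × String × String)) (out : (List (String × String)) × (List (String × String))) : Decidable (Spec_build_verb_form_maps train_pairs out) := by unfold Spec_build_verb_form_maps; infer_instance

-- ===== CLAIM (what is proved, stated in full; the proofs are below) =====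
def Claim_equal_build_verb_form_maps : Prop := ∀ (train_pairs : List (String × String × String)), Dom_build_verb_form_maps train_pairs → Spec_build_verb_form_maps train_pairs (build_verb_form_maps train_pairs)

-- ===== LEMMAS AND PROOFS =====

theorem pvFindAgentB_short (l : List String) (h : l.length < 7) : pvFindAgentB l = none := by
  rcases l with _|⟨a,_|⟨b,_|⟨c,_|⟨d,_|⟨e,_|⟨f,_|⟨g,r⟩⟩⟩⟩⟩⟩⟩ <;>
    first
    | rfl
    | (simp only [List.length_cons] at h; omega)

theorem pvFind_short (L : List String) (k : Nat) (h : L.length < k + 7) :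
    pvFindLoopA L (PySem.List.pyRange (k : Int) ((L.length : Int) - 6) 1) =
      (match pvFindAgentB (L.drop k) with
       | none => (none, none)
       | some (v, p) => (some v, some p)) := by
  rw [PySem.List.pyRange_one_eq_nil (by omega)]
  rw [pvFindAgentB_short _ (by simp only [List.length_drop]; omega)]
  rfl

-- A's inner range-loop starting at position k equals B's window recursion on the k-th suffix
theorem pvFind_agree (L : List String) (k : Nat) :
    pvFindLoopA L (PySem.List.pyRange (k : Int) ((L.length : Int) - 6) 1) =
      (match pvFindAgentB (L.drop k) with
       | none => (none, none)
       | some (v, p) => (some v, some p)) := by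
  induction hm : L.length - k generalizing k with
  | zero => exact pvFind_short L k (by omega)
  | succ m ih =>
    by_cases h7 : L.length < k + 7
    · exact pvFind_short L k h7
    · have hk6 : (k : Int) < (L.length : Int) - 6 := by omega
      rw [PySem.List.pyRange_one_cons hk6]
      have hd : L.drop k = L[k]'(by omega) :: L[k+1]'(by omega) :: L[k+2]'(by omega) ::
          L[k+3]'(by omega) :: L[k+4]'(by omega) :: L[k+5]'(by omega) ::
          L[k+6]'(by omega) :: L.drop (k+7) := by
        rw [List.drop_eq_getElem_cons (by omega : k < L.length),
            List.drop_eq_getElem_cons (by omega : k+1 < L.length),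
            List.drop_eq_getElem_cons (by omega : k+1+1 < L.length),
            List.drop_eq_getElem_cons (by omega : k+1+1+1 < L.length),
            List.drop_eq_getElem_cons (by omega : k+1+1+1+1 < L.length),
            List.drop_eq_getElem_cons (by omega : k+1+1+1+1+1 < L.length),
            List.drop_eq_getElem_cons (by omega : k+1+1+1+1+1+1 < L.length)]
      rw [hd]
      have c : ∀ i : Nat, (k : Int) + (i : Int) = ((k + i : Nat) : Int) := by
        intro i; push_cast; ring
      simp only [pvFindLoopA, pvFindAgentB,
        show (k:Int)+1 = ((k+1:Nat):Int) from c 1, show (k:Int)+2 = ((k+2:Nat):Int) from c 2,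
        show (k:Int)+3 = ((k+3:Nat):Int) from c 3, show (k:Int)+4 = ((k+4:Nat):Int) from c 4,
        show (k:Int)+5 = ((k+5:Nat):Int) from c 5, show (k:Int)+6 = ((k+6:Nat):Int) from c 6,
        PySem.List.pyGet?_natCast,
        List.getElem?_eq_getElem (show k < L.length by omega),
        List.getElem?_eq_getElem (show k+1 < L.length by omega),
        List.getElem?_eq_getElem (show k+2 < L.length by omega),
        List.getElem?_eq_getElem (show k+3 < L.length by omega),
        List.getElem?_eq_getElem (show k+4 < L.length by omega),
        List.getElem?_eq_getElem (show k+5 < L.length by omega),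
        List.getElem?_eq_getElem (show k+6 < L.length by omega),
        Option.map_some, Option.bind_some, Option.some_beq_some, beq_true]
      split_ifs with hcond
      · rfl
      · have hd1 : L.drop (k+1) = L[k+1]'(by omega) :: L[k+2]'(by omega) ::
            L[k+3]'(by omega) :: L[k+4]'(by omega) :: L[k+5]'(by omega) ::
            L[k+6]'(by omega) :: L.drop (k+7) := by
          rw [List.drop_eq_getElem_cons (by omega : k+1 < L.length),
              List.drop_eq_getElem_cons (by omega : k+1+1 < L.length),
              List.drop_eq_getElem_cons (by omega : k+1+1+1 < L.length),
              List.drop_eq_getElem_cons (by omega : k+1+1+1+1 < L.length),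
              List.drop_eq_getElem_cons (by omega : k+1+1+1+1+1 < L.length),
              List.drop_eq_getElem_cons (by omega : k+1+1+1+1+1+1 < L.length)]
        have := ih (k+1) (by omega)
        rw [hd1] at this
        exact this

theorem pvStep_agree_none (st : PySem.Dict String String × PySem.Dict String String)
    (p : String × String × String) (h : pvEntryB p = none) : pvStepA st p = st := by
  have key := pvFind_agree (PySem.Str.split₀ p.2.1) 0
  simp only [Nat.cast_zero, List.drop_zero] at key
  unfold pvEntryB at h
  simp only [pvStepA, key]
  cases hf : pvFindAgentB (PySem.Str.split₀ p.2.1) with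
  | none => rfl
  | some vp =>
    obtain ⟨v, pos⟩ := vp
    rw [hf] at h
    simp only at h ⊢
    by_cases hge : pos ≥ ((PySem.Str.split₀ p.1).length : Int)
    · rw [if_pos hge]
    · rw [if_neg hge] at h ⊢
      cases hg : PySem.List.pyGet? (PySem.Str.split₀ p.1) pos with
      | none => rfl
      | some w => rw [hg] at h; simp at h

theorem pvStep_agree_some (st : PySem.Dict String String × PySem.Dict String String)
    (p : String × String × String) (e : String × String × Bool) (h : pvEntryB p = some e) :
    pvStepA st p = pvStepB st e := by
  have key := pvFind_agree (PySem.Str.split₀ p.2.1) 0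
  simp only [Nat.cast_zero, List.drop_zero] at key
  unfold pvEntryB at h
  simp only [pvStepA, key]
  cases hf : pvFindAgentB (PySem.Str.split₀ p.2.1) with
  | none => rw [hf] at h; simp at h
  | some vp =>
    obtain ⟨v, pos⟩ := vp
    rw [hf] at h
    simp only at h ⊢
    by_cases hge : pos ≥ ((PySem.Str.split₀ p.1).length : Int)
    · rw [if_pos hge] at h; simp at h
    · rw [if_neg hge] at h ⊢
      cases hg : PySem.List.pyGet? (PySem.Str.split₀ p.1) pos with
      | none => rw [hg] at h; simp at h
      | some w =>
        rw [hg] at h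
        simp only [Option.some.injEq] at h ⊢
        subst h
        simp only [pvStepB]
        by_cases hpass : ((PySem.Str.split₀ p.1).contains "was" && (PySem.Str.split₀ p.1).contains "by") = true
        · rw [if_pos hpass, if_pos hpass]
          by_cases hc : st.2.contains v = true
          · rw [PySem.Dict.setdefault_of_contains st.2 w hc, if_pos hc]
          · rw [PySem.Dict.setdefault_of_not_contains st.2 w (by simpa using hc), if_neg hc]
        · rw [if_neg hpass, if_neg hpass]
          by_cases hc : st.1.contains v = true
          · rw [PySem.Dict.setdefault_of_contains st.1 w hc, if_pos hc]
          · rw [PySem.Dict.setdefault_of_not_contains st.1 w (by simpa using hc), if_neg hc]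

-- the two passes of B fused: folding B's step over the filtered entries is A's single fold
theorem pvFold_agree (l : List (String × String × String))
    (init : PySem.Dict String String × PySem.Dict String String) :
    List.foldl pvStepB init (l.filterMap pvEntryB) = List.foldl pvStepA init l := by
  induction l generalizing init with
  | nil => rfl
  | cons p rest ih =>
    simp only [List.filterMap_cons, List.foldl_cons]
    cases h : pvEntryB p with
    | none => rw [pvStep_agree_none init p h]; exact ih init
    | some e =>
      simp only [List.foldl_cons]
      rw [pvStep_agree_some init p e h]
      exact ih _

-- ===== VERDICT (by name: the statement is the Claim_ definition above) =====
theorem build_verb_form_maps_spec : Claim_equal_build_verb_form_maps := by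
  intro tp _
  show (build_verb_form_maps tp) = build_verb_form_maps_alt tp
  show ((List.foldl pvStepA (PySem.Dict.empty, PySem.Dict.empty) tp).1.items,
        (List.foldl pvStepA (PySem.Dict.empty, PySem.Dict.empty) tp).2.items)
      = ((List.foldl pvStepB (PySem.Dict.empty, PySem.Dict.empty) (tp.filterMap pvEntryB)).1.items,
         (List.foldl pvStepB (PySem.Dict.empty, PySem.Dict.empty) (tp.filterMap pvEntryB)).2.items)
  rw [pvFold_agree tp]
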